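-- pv_equiv track=rewrite | github.com/suwonraison900206/TIL | 코드프로그래머스/호델방 배정.py | solution
-- ===== SOURCE A (Python) =====
-- def solution(k, room_number):
--     answer = {}
--     lst = []
--
--     for number in room_number:
--         if number not in answer:
--             answer[number] = 1
--         else:
--             for i in range(number + 1, k):
--
--                 if i not in answer:
--                     answer[i] = 1
--                     break
--
--     for key, value in answer.items():
--         lst.append(key)
--
--     return lst
-- ===== SOURCE B (Python) =====
-- def solution(k, room_number):
--     # Union-find "next free room" pointers with path compression.
--     nxt = {}
--     res = []
--
--     def find(x):
--         path = []
--         while x in nxt: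
--             path.append(x)
--             x = nxt[x]
--         for p in path:
--             nxt[p] = x
--         return x
--
--     for number in room_number:
--         if number not in nxt:
--             nxt[number] = number + 1
--             res.append(number)
--         else:
--             r = find(number + 1)
--             if r < k:
--                 nxt[r] = r + 1
--                 res.append(r)
--     return res
-- ===== Notes on version B (the rewrite author's own statement) =====
-- stated objective: faster
-- what changed: A rescans rooms number+1..k-1 linearly for each duplicate request; B keeps union-find 'next free room' successor pointers with path compression, so each request follows (and then shortcuts) pointers instead of rescanning.
import Mathlib
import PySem

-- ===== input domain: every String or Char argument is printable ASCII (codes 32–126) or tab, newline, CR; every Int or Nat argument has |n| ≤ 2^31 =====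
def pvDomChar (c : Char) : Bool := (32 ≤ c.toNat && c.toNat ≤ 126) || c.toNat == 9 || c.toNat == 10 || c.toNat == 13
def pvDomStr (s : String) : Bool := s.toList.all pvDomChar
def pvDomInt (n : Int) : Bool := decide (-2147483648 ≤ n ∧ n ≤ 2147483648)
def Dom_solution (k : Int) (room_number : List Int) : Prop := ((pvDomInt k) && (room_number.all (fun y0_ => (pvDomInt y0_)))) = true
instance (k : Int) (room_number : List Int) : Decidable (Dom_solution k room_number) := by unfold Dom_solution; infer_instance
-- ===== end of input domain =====

-- B replaces A's linear rescan of rooms number+1..k-1 by union-find "next free room"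
-- pointers with path compression (objective: faster on duplicate-heavy inputs).

-- ===== PORT A =====
-- inner loop: `for i in range(number+1, k): if i not in answer: answer[i] = 1; break`
-- (`range` is iterated lazily, exactly as Python does: i counts up from number+1 while i < k)
def solutionInner (i k : Int) (answer : PySem.Dict Int Int) : PySem.Dict Int Int :=
  if i < k then
    if answer.contains i then solutionInner (i + 1) k answer
    else answer.insert i 1
  else answer
termination_by (k - i).toNat
decreasing_by omega

def solutionStep (k : Int) (answer : PySem.Dict Int Int) (number : Int) : PySem.Dict Int Int :=
  if answer.contains number = false then answer.insert number 1
  else solutionInner (number + 1) k answer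

def solution (k : Int) (room_number : List Int) : List Int :=
  let answer := room_number.foldl (solutionStep k) PySem.Dict.empty
  -- `for key, value in answer.items(): lst.append(key)`
  answer.items.foldl (fun lst kv => lst ++ [kv.1]) []

-- ===== PORT B =====
-- `while x in nxt: path.append(x); x = nxt[x]` — fuel makes the loop total; the proof
-- shows fuel = size + 1 is never exhausted on the states B reaches.
def solutionFindLoop (fuel : Nat) (x : Int) (nxt : PySem.Dict Int Int) : List Int × Int :=
  match fuel with
  | 0 => ([], x)
  | fuel + 1 =>
    match nxt.get? x with
    | none => ([], x)
    | some y =>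
      let pr := solutionFindLoop fuel y nxt
      (x :: pr.1, pr.2)

-- `def find(x): ... for p in path: nxt[p] = x; return x`
def solutionFind (x : Int) (nxt : PySem.Dict Int Int) : Int × PySem.Dict Int Int :=
  let pr := solutionFindLoop (nxt.size + 1) x nxt
  (pr.2, pr.1.foldl (fun d p => d.insert p pr.2) nxt)

def solutionAltStep (k : Int) (st : PySem.Dict Int Int × List Int) (number : Int) :
    PySem.Dict Int Int × List Int :=
  if st.1.contains number = false then (st.1.insert number (number + 1), st.2 ++ [number])
  else
    let rd := solutionFind (number + 1) st.1
    if rd.1 < k then (rd.2.insert rd.1 (rd.1 + 1), st.2 ++ [rd.1]) else (rd.2, st.2)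

def solution_alt (k : Int) (room_number : List Int) : List Int :=
  (room_number.foldl (solutionAltStep k) (PySem.Dict.empty, [])).2

-- ===== PRECONDITION & SPEC =====
def Spec_solution (k : Int) (room_number : List Int) (out : List Int) : Prop := out = solution_alt k room_number
instance (k : Int) (room_number : List Int) (out : List Int) : Decidable (Spec_solution k room_number out) := by unfold Spec_solution; infer_instance

-- ===== CLAIM (what is proved, stated in full; the proofs are below) =====
def Claim_equal_solution : Prop := ∀ (k : Int) (room_number : List Int), Dom_solution k room_number → Spec_solution k room_number (solution k room_number)

-- ===== LEMMAS AND PROOFS =====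

/-- Occupancy invariant of B's pointer dict: every pointer jumps strictly forward and
    skips only occupied rooms. -/
def PtrInv (d : PySem.Dict Int Int) : Prop :=
  ∀ x v, d.get? x = some v → x < v ∧ ∀ j, x ≤ j → j < v → (d.get? j).isSome = true

/-- `r` is the first free room ≥ `a` in dict `d`. -/
def FirstFree (d : PySem.Dict Int Int) (a r : Int) : Prop :=
  a ≤ r ∧ d.get? r = none ∧ ∀ j, a ≤ j → j < r → (d.get? j).isSome = true

/-- Two dicts with the same occupied rooms. -/
def Agree (A B : PySem.Dict Int Int) : Prop :=
  ∀ x, (A.get? x).isSome = (B.get? x).isSome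

theorem pigeon_interval (d : PySem.Dict Int Int) (a r : Int)
    (h : ∀ j, a ≤ j → j < r → (d.get? j).isSome = true) :
    (r - a).toNat ≤ d.keys.length := by
  have hsub : ((List.range (r - a).toNat).map (fun m : Nat => a + (m : Int))) ⊆ d.keys := by
    intro y hy
    simp only [List.mem_map, List.mem_range] at hy
    obtain ⟨m, hm, rfl⟩ := hy
    have : (d.get? (a + (m : Int))).isSome = true := h _ (by omega) (by omega)
    have hne : d.get? (a + (m : Int)) ≠ none := by
      intro hc; rw [hc] at this; simp at this
    by_contra hmem
    exact hne ((PySem.Dict.get?_eq_none_iff_not_mem_keys _ _).2 hmem)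
  have hnodup : ((List.range (r - a).toNat).map (fun m : Nat => a + (m : Int))).Nodup := by
    refine List.Nodup.map ?_ List.nodup_range
    intro m₁ m₂ hmm
    have h' : a + (m₁ : Int) = a + (m₂ : Int) := hmm
    omega
  have := (List.subperm_of_subset hnodup hsub).length_le
  simpa using this

theorem firstFree_exists (d : PySem.Dict Int Int) (a : Int) :
    ∃ r, FirstFree d a r := by
  have hex : ∃ n : Nat, d.get? (a + (n : Int)) = none := by
    by_contra hc
    rw [not_exists] at hc
    have hall : ∀ j, a ≤ j → j < a + (d.keys.length + 1 : Nat) → (d.get? j).isSome = true := by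
      intro j hj _
      have : d.get? (a + ((j - a).toNat : Int)) ≠ none := hc (j - a).toNat
      have hj' : a + ((j - a).toNat : Int) = j := by omega
      rw [hj'] at this
      exact Option.isSome_iff_ne_none.2 this
    have := pigeon_interval d a (a + (d.keys.length + 1 : Nat)) hall
    omega
  classical
  let n₀ := Nat.find hex
  refine ⟨a + (n₀ : Int), ?_, Nat.find_spec hex, ?_⟩
  · omega
  · intro j hj hjr
    have hm : ((j - a).toNat) < n₀ := by omega
    have := Nat.find_min hex hm
    have hj' : a + (((j - a).toNat : Nat) : Int) = j := by omega
    rw [hj'] at this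
    exact Option.isSome_iff_ne_none.2 this

theorem firstFree_of_none {d : PySem.Dict Int Int} {a r : Int}
    (h : FirstFree d a r) (ha : d.get? a = none) : r = a := by
  rcases h with ⟨har, hr, hall⟩
  by_contra hne
  have : a < r := lt_of_le_of_ne har (fun e => hne e.symm)
  have := hall a le_rfl this
  rw [ha] at this; simp at this

theorem firstFree_step {d : PySem.Dict Int Int} {a r v : Int}
    (h : FirstFree d a r) (ha : d.get? a = some v) (hinv : PtrInv d) :
    a < v ∧ v ≤ r ∧ FirstFree d v r := by
  rcases hinv a v ha with ⟨hav, hint⟩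
  rcases h with ⟨har, hr, hall⟩
  have hvr : v ≤ r := by
    by_contra hc
    rw [not_le] at hc
    have := hint r har hc
    rw [hr] at this; simp at this
  exact ⟨hav, hvr, hvr, hr, fun j hj hjr => hall j (by omega) hjr⟩

theorem findLoop_spec (d : PySem.Dict Int Int) (hinv : PtrInv d) :
    ∀ (fuel : Nat) (x r : Int), FirstFree d x r → (r - x).toNat < fuel →
      ∃ path, solutionFindLoop fuel x d = (path, r) ∧ ∀ p ∈ path, x ≤ p ∧ p < r := by
  intro fuel
  induction fuel with
  | zero => intro x r _ hf; omega
  | succ n ih =>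
    intro x r hff hfuel
    cases hx : d.get? x with
    | none =>
      have hr : r = x := firstFree_of_none hff hx
      exact ⟨[], by simp [solutionFindLoop, hx, hr], by simp⟩
    | some v =>
      rcases firstFree_step hff hx hinv with ⟨hxv, hvr, hff'⟩
      have hxr : x < r := by
        obtain ⟨hle, hrnone, -⟩ := id hff
        rcases lt_or_eq_of_le hle with h | h
        · exact h
        · exfalso; rw [← h, hx] at hrnone; simp at hrnone
      rcases ih v r hff' (by omega) with ⟨path, hpl, hpp⟩
      refine ⟨x :: path, ?_, ?_⟩
      · simp [solutionFindLoop, hx, hpl]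
      · intro p hp
        rcases List.mem_cons.1 hp with rfl | hp'
        · exact ⟨le_rfl, hxr⟩
        · rcases hpp p hp' with ⟨h1, h2⟩
          exact ⟨by omega, h2⟩

theorem get?_foldl_insert (r : Int) :
    ∀ (path : List Int) (d : PySem.Dict Int Int) (y : Int),
      (path.foldl (fun d p => d.insert p r) d).get? y =
        if y ∈ path then some r else d.get? y := by
  intro path
  induction path with
  | nil => intro d y; simp
  | cons p ps ih =>
    intro d y
    rw [List.foldl_cons, ih]
    by_cases hps : y ∈ ps
    · simp [hps]
    · by_cases hyp : y = p
      · simp [hyp, PySem.Dict.get?_insert_self]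
      · simp [hps, hyp, PySem.Dict.get?_insert_of_ne _ _ hyp]

theorem foldl_append_fst :
    ∀ (l : List (Int × Int)) (acc : List Int),
      l.foldl (fun lst kv => lst ++ [kv.1]) acc = acc ++ l.map Prod.fst := by
  intro l
  induction l with
  | nil => intro acc; simp
  | cons kv rest ih => intro acc; simp [ih]

theorem ptrInv_insert_fresh {d : PySem.Dict Int Int} (hinv : PtrInv d) (n : Int)
    (hn : d.get? n = none) : PtrInv (d.insert n (n + 1)) := by
  intro x v hx
  rw [PySem.Dict.get?_insert] at hx
  by_cases hxn : x = n
  · subst hxn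
    simp at hx
    subst hx
    refine ⟨by omega, ?_⟩
    intro j hj hjv
    have : j = x := by omega
    subst this
    simp [PySem.Dict.get?_insert_self]
  · rw [if_neg hxn] at hx
    rcases hinv x v hx with ⟨h1, h2⟩
    refine ⟨h1, ?_⟩
    intro j hj hjv
    rw [PySem.Dict.get?_insert]
    by_cases hjn : j = n
    · simp [hjn]
    · simp only [if_neg hjn]; exact h2 j hj hjv

-- one processing step, key already occupied: B's find+compress agrees with A's scan
theorem main_loop (k : Int) :
    ∀ (rooms : List Int) (A B : PySem.Dict Int Int) (res : List Int),
      Agree A B → PtrInv B → res = A.keys →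
      (rooms.foldl (solutionAltStep k) (B, res)).2 =
        (rooms.foldl (solutionStep k) A).keys := by
  intro rooms
  induction rooms with
  | nil => intro A B res _ _ hres; simp [hres]
  | cons number rest ih =>
    intro A B res hag hinv hres
    rw [List.foldl_cons, List.foldl_cons]
    by_cases hmem : (B.get? number).isSome = true
    · -- number already occupied
      have hmemA : (A.get? number).isSome = true := by rw [hag]; exact hmem
      have hcontA : A.contains number = true := by
        rw [PySem.Dict.contains_eq_isSome_get?]; exact hmemA
      have hcontB : B.contains number = true := by
        rw [PySem.Dict.contains_eq_isSome_get?]; exact hmem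
      rcases firstFree_exists B (number + 1) with ⟨r, hff⟩
      have hffA : FirstFree A (number + 1) r := by
        rcases hff with ⟨h1, h2, h3⟩
        refine ⟨h1, ?_, fun j hj hjr => by rw [hag]; exact h3 j hj hjr⟩
        have : (A.get? r).isSome = (B.get? r).isSome := hag r
        rw [h2] at this
        simpa [Option.isSome_iff_ne_none] using this
      -- A's side
      have hAstep : solutionStep k A number =
          if r < k then A.insert r 1 else A := by
        simp only [solutionStep]
        rw [if_neg (by simp [hcontA])]
        -- inner-scan characterisation
        clear ih hres hag hinv hff hcontA hcontB hmem hmemA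
        rcases hffA with ⟨h1, h2, h3⟩
        have : ∀ (n : Nat) (a : Int), a ≤ r → (d : (k - a).toNat = n) →
            (∀ j, a ≤ j → j < r → (A.get? j).isSome = true) →
            solutionInner a k A = if r < k then A.insert r 1 else A := by
          intro n
          induction n with
          | zero =>
            intro a har hd h3'
            have hka : ¬ a < k := by omega
            have hrk : ¬ r < k := by omega
            rw [solutionInner, if_neg hka, if_neg hrk]
          | succ m ihm =>
            intro a har hd h3'
            have hak : a < k := by omega
            by_cases har' : a = r
            · subst har'
              have hca : A.contains a = false := by
                rw [PySem.Dict.contains_eq_isSome_get?, h2]; rfl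
              rw [solutionInner, if_pos hak, if_neg (by simp [hca]), if_pos (by omega)]
            · have halt : a < r := lt_of_le_of_ne har har'
              have hca : A.contains a = true := by
                rw [PySem.Dict.contains_eq_isSome_get?]
                exact h3' a le_rfl halt
              rw [solutionInner, if_pos hak, if_pos hca]
              exact ihm (a + 1) (by omega) (by omega)
                (fun j hj hjr => h3' j (by omega) hjr)
        exact this (k - (number + 1)).toNat (number + 1) h1 rfl h3
      -- B's side: find returns (r, compressed)
      have hfuel : (r - (number + 1)).toNat < B.size + 1 := by
        have : (r - (number + 1)).toNat ≤ B.keys.length :=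
          pigeon_interval B (number + 1) r hff.2.2
        have hsz : B.keys.length = B.size := by
          simp [PySem.Dict.keys, PySem.Dict.size]
        omega
      rcases findLoop_spec B hinv (B.size + 1) (number + 1) r hff hfuel with
        ⟨path, hpl, hpp⟩
      have hpathKey : ∀ p ∈ path, (B.get? p).isSome = true := by
        intro p hp
        rcases hpp p hp with ⟨h1, h2⟩
        exact hff.2.2 p h1 h2
      have hBfind : solutionFind (number + 1) B =
          (r, path.foldl (fun d p => d.insert p r) B) := by
        simp [solutionFind, hpl]
      set B' := path.foldl (fun d p => d.insert p r) B with hB'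
      have hgetB' : ∀ y, B'.get? y = if y ∈ path then some r else B.get? y :=
        fun y => get?_foldl_insert r path B y
      have hagB' : Agree A B' := by
        intro y
        rw [hag y, hgetB' y]
        by_cases hy : y ∈ path
        · simp [hy, hpathKey y hy]
        · simp [hy]
      have hinvB' : PtrInv B' := by
        intro x v hx
        rw [hgetB' x] at hx
        by_cases hxp : x ∈ path
        · rw [if_pos hxp] at hx
          rcases hpp x hxp with ⟨hx1, hx2⟩
          injection hx with hv
          subst hv
          refine ⟨hx2, ?_⟩
          intro j hj hjv
          rw [hgetB' j]
          by_cases hjp : j ∈ path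
          · simp [hjp]
          · simp only [if_neg hjp]
            exact hff.2.2 j (by rcases hpp x hxp with ⟨h1, _⟩; omega) hjv
        · rw [if_neg hxp] at hx
          rcases hinv x v hx with ⟨h1, h2⟩
          refine ⟨h1, ?_⟩
          intro j hj hjv
          rw [hgetB' j]
          by_cases hjp : j ∈ path
          · simp [hjp]
          · simp only [if_neg hjp]; exact h2 j hj hjv
      simp only [solutionAltStep]
      rw [if_neg (by simp [hcontB]), hBfind, hAstep]
      by_cases hrk : r < k
      · simp only [if_pos hrk]
        have hrfreeB' : B'.get? r = none := by
          rw [hgetB' r]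
          have : r ∉ path := by
            intro hc; rcases hpp r hc with ⟨_, h⟩; omega
          simp [this, hff.2.1]
        have hrfreeA : A.get? r = none := by
          have := hagB' r
          rw [hrfreeB'] at this
          simpa [Option.isSome_iff_ne_none] using this
        have hcontAr : A.contains r = false := by
          rw [PySem.Dict.contains_eq_isSome_get?, hrfreeA]; rfl
        apply ih
        · intro y
          rw [PySem.Dict.get?_insert, PySem.Dict.get?_insert]
          by_cases hy : y = r
          · simp [hy]
          · simp only [if_neg hy]; exact hagB' y
        · exact ptrInv_insert_fresh hinvB' r hrfreeB'
        · rw [PySem.Dict.keys_insert_of_not_contains _ _ hcontAr, hres]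
      · simp only [if_neg hrk]
        exact ih A B' res hagB' hinvB' hres
    · -- number is a new room
      have hmemA : (A.get? number).isSome = false := by
        rw [hag]; simpa using hmem
      have hgetA : A.get? number = none := by
        cases h : A.get? number with
        | none => rfl
        | some v => rw [h] at hmemA; simp at hmemA
      have hgetB : B.get? number = none := by
        have := hag number
        rw [hgetA] at this
        cases h : B.get? number with
        | none => rfl
        | some v => rw [h] at this; simp at this
      have hcontA : A.contains number = false := by
        rw [PySem.Dict.contains_eq_isSome_get?, hgetA]; rfl
      have hcontB : B.contains number = false := by
        rw [PySem.Dict.contains_eq_isSome_get?, hgetB]; rfl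
      simp only [solutionStep, solutionAltStep]
      rw [if_pos hcontA, if_pos hcontB]
      apply ih
      · intro y
        rw [PySem.Dict.get?_insert, PySem.Dict.get?_insert]
        by_cases hy : y = number
        · simp [hy]
        · simp only [if_neg hy]; exact hag y
      · exact ptrInv_insert_fresh hinv number hgetB
      · rw [PySem.Dict.keys_insert_of_not_contains _ _ hcontA, hres]

-- ===== VERDICT (by name: the statement is the Claim_ definition above) =====
theorem solution_spec : Claim_equal_solution := by
  intro k room_number _
  unfold Spec_solution solution solution_alt
  rw [foldl_append_fst]
  simp only [List.nil_append]
  have h := main_loop k room_number PySem.Dict.empty PySem.Dict.empty []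
    (fun x => rfl)
    (fun x v hx => by simp at hx) (by simp)
  have hk : (room_number.foldl (solutionStep k) PySem.Dict.empty).items.map Prod.fst
      = (room_number.foldl (solutionStep k) PySem.Dict.empty).keys := rfl
  rw [hk]
  exact h.symm
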